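-- pv_equiv track=rewrite | github.com/uttamks2003/Ai_Lab-Codes | Ai_Lab_4_codes.py | isGameEnd
-- ===== SOURCE A (Python) =====
-- def isGameEnd(state):
--   for i in range(3):
--     if state[i][0] == state[i][1] == state[i][2] == 'X':
--         return True
--     if state[0][i] == state[1][i] == state[2][i] == 'X':
--         return True
--     if state[i][0] == state[i][1] == state[i][2] == 'O':
--         return True
--     if state[0][i] == state[1][i] == state[2][i] == 'O':
--         return True
--   if state[0][0] == state[1][1] == state[2][2] == 'X' or state[0][2] == state[1][1] == state[2][0] == 'X':
--     return True
--   if state[0][0] == state[1][1] == state[2][2] == 'O' or state[0][2] == state[1][1] == state[2][0] == 'O':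
--     return True
--
--   for i in range(3):
--     for j in range(3):
--       if state[i][j] == '': return False
--
--   return True
-- ===== SOURCE B (Python) =====
-- # Bitmask re-implementation: one pass over the 9 cells builds three 9-bit masks
-- # (X positions, O positions, empty positions); a win is a winning mask contained
-- # in x or o, and the board is full iff the empty mask is 0.
-- WIN_MASKS = (7, 56, 448, 73, 146, 292, 273, 84)
--
--
-- def _mask(cells, p):
--     m = 0
--     for k, v in enumerate(cells):
--         if p(v):
--             m += 2 ** k
--     return m
--
--
-- def isGameEnd(state):
--     cells = [state[i][j] for i in range(3) for j in range(3)]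
--     x = _mask(cells, lambda v: v == 'X')
--     o = _mask(cells, lambda v: v == 'O')
--     e = _mask(cells, lambda v: v == '')
--     return e == 0 or any(x & w == w or o & w == w for w in WIN_MASKS)
-- ===== Notes on version B (the rewrite author's own statement) =====
-- stated objective: alternative
-- what changed: Replaced A's cascade of per-line string-equality chains with a bitmask encoding: one pass builds three 9-bit integers (X positions, O positions, empty positions) and the result is 'empty mask is 0 or some winning mask is contained (bitwise AND) in the X or O mask'.
-- outside the precondition, e.g. on isGameEnd([['X', 'X', 'X']]): A returns True, B raises IndexError
import Mathlib
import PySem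

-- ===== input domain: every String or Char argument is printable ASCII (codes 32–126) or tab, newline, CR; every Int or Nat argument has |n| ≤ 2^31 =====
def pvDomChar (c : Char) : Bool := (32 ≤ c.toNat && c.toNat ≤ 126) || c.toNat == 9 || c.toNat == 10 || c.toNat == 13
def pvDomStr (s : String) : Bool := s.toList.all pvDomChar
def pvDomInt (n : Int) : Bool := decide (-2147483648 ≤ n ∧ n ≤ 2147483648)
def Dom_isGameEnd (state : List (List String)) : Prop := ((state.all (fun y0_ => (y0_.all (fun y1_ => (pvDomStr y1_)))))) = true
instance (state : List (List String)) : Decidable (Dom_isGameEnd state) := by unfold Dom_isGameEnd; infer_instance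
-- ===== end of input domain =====

-- B replaces A's cascade of per-line string-equality chains with a bitmask encoding:
-- one pass builds three 9-bit integers (X/O/empty positions), then checks masks (objective: alternative).

-- ===== PORT A =====
-- state[i][j]; exact on Pre_ (all indices 0..2 in range, so pyGet? never returns none there)
def cellA (state : List (List String)) (i j : Int) : String :=
  (PySem.List.pyGet? ((PySem.List.pyGet? state i).getD []) j).getD ""

def isGameEnd (state : List (List String)) : Bool :=
  -- for i in range(3): four early-return if-checks per i  →  any over the disjunction
  if (PySem.List.pyRange 0 3 1).any (fun i =>
      (cellA state i 0 == cellA state i 1 && (cellA state i 1 == cellA state i 2 && cellA state i 2 == "X")) ||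
      (cellA state 0 i == cellA state 1 i && (cellA state 1 i == cellA state 2 i && cellA state 2 i == "X")) ||
      (cellA state i 0 == cellA state i 1 && (cellA state i 1 == cellA state i 2 && cellA state i 2 == "O")) ||
      (cellA state 0 i == cellA state 1 i && (cellA state 1 i == cellA state 2 i && cellA state 2 i == "O"))) then
    true
  else if (cellA state 0 0 == cellA state 1 1 && (cellA state 1 1 == cellA state 2 2 && cellA state 2 2 == "X")) ||
          (cellA state 0 2 == cellA state 1 1 && (cellA state 1 1 == cellA state 2 0 && cellA state 2 0 == "X")) then
    true
  else if (cellA state 0 0 == cellA state 1 1 && (cellA state 1 1 == cellA state 2 2 && cellA state 2 2 == "O")) ||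
          (cellA state 0 2 == cellA state 1 1 && (cellA state 1 1 == cellA state 2 0 && cellA state 2 0 == "O")) then
    true
  else if (PySem.List.pyRange 0 3 1).any (fun i =>
            (PySem.List.pyRange 0 3 1).any (fun j => cellA state i j == "")) then
    false
  else
    true

-- ===== PORT B =====
def cellB (state : List (List String)) (i j : Int) : String :=
  (PySem.List.pyGet? ((PySem.List.pyGet? state i).getD []) j).getD ""

def winMasksB : List Int := [7, 56, 448, 73, 146, 292, 273, 84]

-- _mask(cells, p): m += 2**k for the cells where p holds; 2**k ported as
-- (2:Int)^k.toNat, exact since enumerate indices are ≥ 0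
def maskB (cells : List String) (p : String → Bool) : Int :=
  (PySem.List.enumerate cells).foldl
    (fun m kv => if p kv.2 then m + (2 : Int) ^ kv.1.toNat else m) 0

def isGameEnd_alt (state : List (List String)) : Bool :=
  let cells := (PySem.List.pyRange 0 3 1).flatMap (fun i =>
    (PySem.List.pyRange 0 3 1).map (fun j => cellB state i j))
  let x := maskB cells (fun v => v == "X")
  let o := maskB cells (fun v => v == "O")
  let e := maskB cells (fun v => v == "")
  e == 0 || winMasksB.any (fun w => PySem.Int.band x w == w || PySem.Int.band o w == w)

-- ===== PRECONDITION & SPEC =====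
-- Pre_ requires a full 3×3 board (A indexes state[0..2][0..2]); it also excludes ragged
-- boards on which A happens to return True via an early winning-line check before the
-- missing cells are touched (e.g. [["X","X","X"]]), where B raises IndexError.
def Pre_isGameEnd (state : List (List String)) : Prop :=
  3 ≤ state.length ∧ ∀ r ∈ state.take 3, 3 ≤ r.length
instance (state : List (List String)) : Decidable (Pre_isGameEnd state) := by
  unfold Pre_isGameEnd; infer_instance

def pvWitness_isGameEnd : List (List String) :=
  [["X", "O", ""], ["", "X", "O"], ["O", "", "X"]]

def Spec_isGameEnd (state : List (List String)) (out : Bool) : Prop := out = isGameEnd_alt state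
instance (state : List (List String)) (out : Bool) : Decidable (Spec_isGameEnd state out) := by
  unfold Spec_isGameEnd; infer_instance

-- ===== CLAIM (what is proved, stated in full; the proofs are below) =====
def Claim_equal_isGameEnd : Prop := ∀ (state : List (List String)), Dom_isGameEnd state → Pre_isGameEnd state → Spec_isGameEnd state (isGameEnd state)

-- ===== LEMMAS AND PROOFS =====
theorem pg1 {q : Type} (x : q) (xs : List q) :
    PySem.List.pyGet? (x :: xs) 1 = PySem.List.pyGet? xs 0 := by
  have h := PySem.List.pyGet?_cons_succ x xs 0
  simpa using h

theorem pg2 {q : Type} (x : q) (xs : List q) :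
    PySem.List.pyGet? (x :: xs) 2 = PySem.List.pyGet? xs 1 := by
  have h := PySem.List.pyGet?_cons_succ x xs 1
  simpa using h

-- 'if c: return True' / final 'return False/True' as Bool operations
theorem iteOr (c x : Bool) : (if c = true then true else x) = (c || x) := by
  cases c <;> simp

theorem iteNot (c : Bool) : (if c = true then false else true) = !c := by
  cases c <;> simp

-- an equality chain ending in a literal is the per-cell conjunction
theorem eqChain (x y z m : String) :
    (x == y && (y == z && z == m)) = (x == m && (y == m && z == m)) := by
  by_cases hz : z = m
  · subst hz
    by_cases hy : y = z
    · subst hy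
      by_cases hx : x = y <;> simp [hx]
    · have hf : (y == z) = false := by simp [hy]
      simp [hf]
  · have hf : (z == m) = false := by simp [hz]
    simp [hf]

-- the mask of a 9-cell board, with the nine per-cell conditions abstracted
def mk9 (c0 c1 c2 c3 c4 c5 c6 c7 c8 : Bool) : Int :=
  ([((0 : Int), c0), (1, c1), (2, c2), (3, c3), (4, c4), (5, c5), (6, c6), (7, c7), (8, c8)]).foldl
    (fun m kv => if kv.2 then m + (2 : Int) ^ kv.1.toNat else m) 0

theorem maskB_nine (v0 v1 v2 v3 v4 v5 v6 v7 v8 : String) (p : String → Bool) :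
    maskB [v0, v1, v2, v3, v4, v5, v6, v7, v8] p
      = mk9 (p v0) (p v1) (p v2) (p v3) (p v4) (p v5) (p v6) (p v7) (p v8) := by
  simp [maskB, mk9, PySem.List.enumerate]

-- containment of each winning mask, and emptiness, as per-cell conjunctions
theorem mkFacts (c0 c1 c2 c3 c4 c5 c6 c7 c8 : Bool) :
    (PySem.Int.band (mk9 c0 c1 c2 c3 c4 c5 c6 c7 c8) 7 == 7) = (c0 && (c1 && c2)) ∧
    (PySem.Int.band (mk9 c0 c1 c2 c3 c4 c5 c6 c7 c8) 56 == 56) = (c3 && (c4 && c5)) ∧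
    (PySem.Int.band (mk9 c0 c1 c2 c3 c4 c5 c6 c7 c8) 448 == 448) = (c6 && (c7 && c8)) ∧
    (PySem.Int.band (mk9 c0 c1 c2 c3 c4 c5 c6 c7 c8) 73 == 73) = (c0 && (c3 && c6)) ∧
    (PySem.Int.band (mk9 c0 c1 c2 c3 c4 c5 c6 c7 c8) 146 == 146) = (c1 && (c4 && c7)) ∧
    (PySem.Int.band (mk9 c0 c1 c2 c3 c4 c5 c6 c7 c8) 292 == 292) = (c2 && (c5 && c8)) ∧
    (PySem.Int.band (mk9 c0 c1 c2 c3 c4 c5 c6 c7 c8) 273 == 273) = (c0 && (c4 && c8)) ∧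
    (PySem.Int.band (mk9 c0 c1 c2 c3 c4 c5 c6 c7 c8) 84 == 84) = (c2 && (c4 && c6)) ∧
    (mk9 c0 c1 c2 c3 c4 c5 c6 c7 c8 == 0) = (!c0 && (!c1 && (!c2 && (!c3 && (!c4 && (!c5 && (!c6 && (!c7 && !c8)))))))) := by
  cases c0 <;> cases c1 <;> cases c2 <;> cases c3 <;> cases c4 <;>
    cases c5 <;> cases c6 <;> cases c7 <;> cases c8 <;> decide

-- ===== VERDICT (by name: the statement is the Claim_ definition above) =====
set_option maxHeartbeats 2000000 in
theorem isGameEnd_spec : Claim_equal_isGameEnd := by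
  intro state hdom hpre
  obtain ⟨hl, hr⟩ := hpre
  match state with
  | r0 :: r1 :: r2 :: rest =>
    have h0 : 3 ≤ r0.length := hr r0 (by simp [List.take])
    have h1 : 3 ≤ r1.length := hr r1 (by simp [List.take])
    have h2 : 3 ≤ r2.length := hr r2 (by simp [List.take])
    match r0, r1, r2 with
    | a :: b :: c :: _, d :: e :: f :: _, g :: h :: i :: _ =>
      clear hdom hl hr h0 h1 h2
      show _ = _
      simp only [isGameEnd, isGameEnd_alt, cellA, cellB, winMasksB,
        show PySem.List.pyRange 0 3 1 = [0, 1, 2] from by decide,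
        List.any_cons, List.any_nil, List.flatMap_cons, List.flatMap_nil,
        List.map_cons, List.map_nil, List.append_nil, List.cons_append,
        List.nil_append,
        pg1, pg2, PySem.List.pyGet?_zero_cons, Option.getD_some,
        Bool.or_false]
      rw [maskB_nine, maskB_nine, maskB_nine]
      obtain ⟨x1, x2, x3, x4, x5, x6, x7, x8, _⟩ :=
        mkFacts (a == "X") (b == "X") (c == "X") (d == "X") (e == "X") (f == "X") (g == "X") (h == "X") (i == "X")
      obtain ⟨o1, o2, o3, o4, o5, o6, o7, o8, _⟩ :=
        mkFacts (a == "O") (b == "O") (c == "O") (d == "O") (e == "O") (f == "O") (g == "O") (h == "O") (i == "O")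
      obtain ⟨-, -, -, -, -, -, -, -, e0⟩ :=
        mkFacts (a == "") (b == "") (c == "") (d == "") (e == "") (f == "") (g == "") (h == "") (i == "")
      rw [x1, x2, x3, x4, x5, x6, x7, x8, o1, o2, o3, o4, o5, o6, o7, o8, e0,
        iteOr, iteOr, iteOr, iteNot,
        eqChain a b c "X", eqChain d e f "X", eqChain g h i "X",
        eqChain a d g "X", eqChain b e h "X", eqChain c f i "X",
        eqChain a e i "X", eqChain c e g "X",
        eqChain a b c "O", eqChain d e f "O", eqChain g h i "O",
        eqChain a d g "O", eqChain b e h "O", eqChain c f i "O",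
        eqChain a e i "O", eqChain c e g "O"]
      simp only [Bool.not_or]
      ac_rfl
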